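-- pv_equiv track=rewrite | github.com/ramrajsingh10/tender-automation | services/ingest_api/normalizer.py | _generate_entity_anchor
-- ===== SOURCE A (Python) =====
-- from typing import Any, Iterable
--
-- def _generate_entity_anchor(entity: dict[str, Any], anchors: dict[str, dict[str, int]]) -> str:
--     base = "section"
--     counter = 0
--     anchor_id = f"{base}-{counter}"
--     while anchor_id in anchors:
--         counter += 1
--         anchor_id = f"{base}-{counter}"
--     return anchor_id
-- ===== SOURCE B (Python) =====
-- def _generate_entity_anchor(entity, anchors):
--     n = len(anchors)
--     index_of = {f"section-{i}": i for i in range(n + 1)}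
--     present = [False] * (n + 1)
--     for key in anchors:
--         i = index_of.get(key)
--         if i is not None:
--             present[i] = True
--     return f"section-{present.index(False)}"
-- ===== Notes on version B (the rewrite author's own statement) =====
-- stated objective: alternative
-- what changed: Instead of A's probe loop that tests candidate ids against the dict one by one, B builds a table mapping the n+1 candidate ids 'section-0'..'section-n' to their indices, marks a boolean array by a single pass over the keys, and returns the first unmarked index (counting-style mex; correct because n keys can cover at most n of the n+1 candidates).
import Mathlib
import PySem

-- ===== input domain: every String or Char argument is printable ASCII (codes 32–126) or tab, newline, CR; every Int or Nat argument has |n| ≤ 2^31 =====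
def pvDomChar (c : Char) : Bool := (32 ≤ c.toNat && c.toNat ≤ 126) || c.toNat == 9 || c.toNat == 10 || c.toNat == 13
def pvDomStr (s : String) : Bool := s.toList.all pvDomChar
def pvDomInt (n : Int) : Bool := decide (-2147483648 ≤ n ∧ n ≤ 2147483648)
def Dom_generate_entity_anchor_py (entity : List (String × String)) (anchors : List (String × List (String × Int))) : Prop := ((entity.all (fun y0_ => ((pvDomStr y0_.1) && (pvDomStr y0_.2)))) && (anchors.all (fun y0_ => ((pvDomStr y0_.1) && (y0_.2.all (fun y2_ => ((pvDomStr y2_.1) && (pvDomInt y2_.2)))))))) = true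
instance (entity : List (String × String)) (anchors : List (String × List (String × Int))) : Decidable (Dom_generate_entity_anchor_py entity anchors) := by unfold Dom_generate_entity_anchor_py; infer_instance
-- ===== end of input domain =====

-- B replaces A's candidate-probing loop by a counting-style mex: it maps the n+1 candidate
-- ids to indices once, marks a boolean array in one pass over the keys, and returns the
-- first unmarked index (an alternative algorithm of similar cost, not claimed faster).

-- ===== PORT A =====
-- the while loop of A, with fuel anchors.length + 1 (always enough: the length+1 probed
-- candidate ids are pairwise distinct, so they cannot all be among the ≤ length keys)
def pvALoop (keys : List String) : Nat → Int → String
  | 0, counter => "section-" ++ PySem.Int.toStr counter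
  | fuel + 1, counter =>
    let anchor_id := "section-" ++ PySem.Int.toStr counter
    if keys.contains anchor_id then pvALoop keys fuel (counter + 1) else anchor_id

def generate_entity_anchor_py (entity : List (String × String)) (anchors : List (String × List (String × Int))) : String :=
  pvALoop (anchors.map Prod.fst) (anchors.length + 1) 0

-- ===== PORT B =====
-- index_of = {f"section-{i}": i for i in range(n + 1)}
def pvIndexOf (n : Nat) : PySem.Dict String Int :=
  (PySem.List.pyRange 0 ((n : Int) + 1) 1).foldl
    (fun d i => d.insert ("section-" ++ PySem.Int.toStr i) i) PySem.Dict.empty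

-- the marking loop: for key in anchors: i = index_of.get(key); if i is not None: present[i] = True
-- (present[i] = True ported with pySetD, exact here: every value stored in index_of is in 0..n)
def pvMark (index_of : PySem.Dict String Int) (present : List Bool)
    (anchors : List (String × List (String × Int))) : List Bool :=
  anchors.foldl
    (fun p kv =>
      match index_of.get? kv.1 with
      | some i => PySem.List.pySetD p i true
      | none => p)
    present

def generate_entity_anchor_py_alt (entity : List (String × String)) (anchors : List (String × List (String × Int))) : String :=
  let n := anchors.length
  let index_of := pvIndexOf n
  let present := pvMark index_of (List.replicate (n + 1) false) anchors
  match PySem.List.index? present false with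
  | some i => "section-" ++ PySem.Int.toStr (i : Int)
  | none => ""  -- unreachable (ValueError in Python): at most n of the n+1 cells get marked

-- ===== PRECONDITION & SPEC =====
def Spec_generate_entity_anchor_py (entity : List (String × String)) (anchors : List (String × List (String × Int))) (out : String) : Prop := out = generate_entity_anchor_py_alt entity anchors
instance (entity : List (String × String)) (anchors : List (String × List (String × Int))) (out : String) : Decidable (Spec_generate_entity_anchor_py entity anchors out) := by unfold Spec_generate_entity_anchor_py; infer_instance

-- ===== CLAIM (what is proved, stated in full; the proofs are below) =====
def Claim_equal_generate_entity_anchor_py : Prop := ∀ (entity : List (String × String)) (anchors : List (String × List (String × Int))), Dom_generate_entity_anchor_py entity anchors → Spec_generate_entity_anchor_py entity anchors (generate_entity_anchor_py entity anchors)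

-- ===== LEMMAS AND PROOFS =====

-- the candidate id for index i
def pvCand (i : Nat) : String := "section-" ++ PySem.Int.toStr (i : Int)

theorem pv_digitChar_inj {m n : Nat} (hm : m < 10) (hn : n < 10)
    (h : Nat.digitChar m = Nat.digitChar n) : m = n := by
  interval_cases m <;> interval_cases n <;> simp_all [Nat.digitChar]

theorem pv_toDigits_inj : ∀ m n : Nat, Nat.toDigits 10 m = Nat.toDigits 10 n → m = n := by
  intro m
  induction m using Nat.strong_induction_on with
  | _ m ih =>
    intro n h
    rw [Nat.toDigits_eq_if (b := 10) (n := m) (by norm_num),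
        Nat.toDigits_eq_if (b := 10) (n := n) (by norm_num)] at h
    by_cases hm : m < 10 <;> by_cases hn : n < 10
    · rw [if_pos hm, if_pos hn] at h
      injection h with h' _
      exact pv_digitChar_inj hm hn h'
    · rw [if_pos hm, if_neg hn] at h
      have hlen := congrArg List.length h
      have hpos : 0 < (Nat.toDigits 10 (n / 10)).length := Nat.length_toDigits_pos
      rw [List.length_singleton, List.length_append, List.length_singleton] at hlen
      omega
    · rw [if_neg hm, if_pos hn] at h
      have hlen := congrArg List.length h
      have hpos : 0 < (Nat.toDigits 10 (m / 10)).length := Nat.length_toDigits_pos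
      rw [List.length_singleton, List.length_append, List.length_singleton] at hlen
      omega
    · rw [if_neg hm, if_neg hn] at h
      obtain ⟨h3, h4⟩ := List.append_inj' h (by simp)
      have hdiv : m / 10 = n / 10 :=
        ih (m / 10) (Nat.div_lt_self (by omega) (by norm_num)) _ h3
      injection h4 with h4' _
      have hmod : m % 10 = n % 10 :=
        pv_digitChar_inj (Nat.mod_lt _ (by norm_num)) (Nat.mod_lt _ (by norm_num)) h4'
      omega

theorem pv_toStr_natCast (i : Nat) :
    PySem.Int.toStr (i : Int) = String.ofList (Nat.toDigits 10 i) := by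
  unfold PySem.Int.toStr PySem.Int.toChars
  rw [if_neg (not_lt.mpr (Int.natCast_nonneg i)), Int.toNat_natCast]

theorem pv_cand_inj {i j : Nat} (h : pvCand i = pvCand j) : i = j := by
  unfold pvCand at h
  rw [pv_toStr_natCast, pv_toStr_natCast] at h
  have h2 := congrArg String.toList h
  simp only [String.toList_append] at h2
  have h3 := List.append_cancel_left h2
  simp only [String.toList_ofList] at h3
  exact pv_toDigits_inj _ _ h3

-- the comprehension dict: its items are exactly [(cand 0, 0), …, (cand n, n)]
theorem pv_items (n : Nat) :
    (pvIndexOf n).items = (List.range (n + 1)).map (fun i => (pvCand i, (i : Int))) := by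
  unfold pvIndexOf
  rw [show ((n : Int) + 1) = ((n + 1 : Nat) : Int) by push_cast; ring,
      PySem.List.pyRange_zero_nat, List.foldl_map]
  have h := PySem.Dict.items_foldl_insert_fresh (List.range (n + 1))
      (fun i : Nat => pvCand i) (fun i : Nat => (i : Int)) PySem.Dict.empty
      (fun a _ => PySem.Dict.contains_empty _)
      (List.nodup_range.map_on (fun x _ y _ hxy => pv_cand_inj hxy))
  simpa [pvCand] using h

theorem pv_keys_nodup (n : Nat) : (pvIndexOf n).keys.Nodup := by
  have h : (pvIndexOf n).keys = (List.range (n + 1)).map pvCand := by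
    simp [PySem.Dict.keys, pv_items, List.map_map, Function.comp]
  rw [h]
  exact List.nodup_range.map_on (fun x _ y _ hxy => pv_cand_inj hxy)

theorem pv_get?_iff (n : Nat) (k : String) (i : Int) :
    (pvIndexOf n).get? k = some i ↔ ∃ j : Nat, j < n + 1 ∧ k = pvCand j ∧ i = (j : Int) := by
  rw [PySem.Dict.get?_eq_some_iff_mem_items _ _ _ (pv_keys_nodup n), pv_items]
  simp only [List.mem_map, List.mem_range, Prod.mk.injEq]
  constructor
  · rintro ⟨j, hj, hk, hi⟩; exact ⟨j, hj, hk.symm, hi.symm⟩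
  · rintro ⟨j, hj, hk, hi⟩; exact ⟨j, hj, hk.symm, hi.symm⟩

theorem pv_mark_length (d : PySem.Dict String Int)
    (as : List (String × List (String × Int))) (p : List Bool) :
    (pvMark d p as).length = p.length := by
  induction as generalizing p with
  | nil => rfl
  | cons kv rest ih =>
    have hstep : pvMark d p (kv :: rest)
        = pvMark d (match d.get? kv.1 with
                    | some i => PySem.List.pySetD p i true
                    | none => p) rest := rfl
    rw [hstep, ih]
    rcases h : d.get? kv.1 with _ | i <;> simp [PySem.List.length_pySetD]

-- pointwise effect of the marking loop
theorem pv_mark_getD (n : Nat) (as : List (String × List (String × Int))) :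
    ∀ (p : List Bool), p.length = n + 1 → ∀ j, j < n + 1 →
      (pvMark (pvIndexOf n) p as).getD j false
        = (p.getD j false || decide (pvCand j ∈ as.map Prod.fst)) := by
  induction as with
  | nil => intro p _ j _; simp [pvMark]
  | cons kv rest ih =>
    intro p hp j hj
    rcases h : (pvIndexOf n).get? kv.1 with _ | i
    · have hne : pvCand j ≠ kv.1 := by
        intro he
        have hs : (pvIndexOf n).get? kv.1 = some (j : Int) :=
          (pv_get?_iff n kv.1 (j : Int)).mpr ⟨j, hj, he.symm, rfl⟩
        simp [h] at hs
      have hstep : pvMark (pvIndexOf n) p (kv :: rest) = pvMark (pvIndexOf n) p rest := by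
        simp [pvMark, h]
      rw [hstep, ih p hp j hj]
      by_cases hmr : pvCand j ∈ rest.map Prod.fst <;> simp [List.mem_cons, hmr, hne]
    · obtain ⟨j₀, hj₀, hk, hi⟩ := (pv_get?_iff n kv.1 i).mp h
      have hstep : pvMark (pvIndexOf n) p (kv :: rest)
          = pvMark (pvIndexOf n) (p.set j₀ true) rest := by
        simp [pvMark, h, hi,
          PySem.List.pySetD_of_nonneg (xs := p) (i := ((j₀ : Nat) : Int)) true (by positivity)]
      rw [hstep, ih _ (by simp [hp]) j hj]
      have hget : (p.set j₀ true).getD j false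
          = (p.getD j false || decide (pvCand j = kv.1)) := by
        by_cases hjj : j = j₀
        · subst hjj
          simp [List.getD_eq_getElem?_getD, hp, hj, hk]
        · have hne2 : pvCand j ≠ kv.1 := fun he => hjj (pv_cand_inj (hk ▸ he))
          simp [List.getD_eq_getElem?_getD, Ne.symm hjj, hne2]
      rw [hget]
      by_cases hmr : pvCand j ∈ rest.map Prod.fst <;>
        by_cases he : pvCand j = kv.1 <;>
          simp [List.mem_cons, hmr, he, Bool.or_comm]

-- pigeonhole: c pairwise-distinct used candidate ids need at least c keys
theorem pv_used_le (keys : List String) (c : Nat)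
    (hmin : ∀ j, j < c → pvCand j ∈ keys) : c ≤ keys.length := by
  have hnd : ((List.range c).map pvCand).Nodup :=
    List.nodup_range.map_on (fun x _ y _ hxy => pv_cand_inj hxy)
  have hsub : ((List.range c).map pvCand).toFinset ⊆ keys.toFinset := by
    intro x hx
    rw [List.mem_toFinset] at hx ⊢
    obtain ⟨j, hj, rfl⟩ := List.mem_map.mp hx
    exact hmin j (List.mem_range.mp hj)
  have h1 : ((List.range c).map pvCand).toFinset.card = c := by
    rw [List.toFinset_card_of_nodup hnd]; simp
  have h2 := Finset.card_le_card hsub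
  have h3 := List.toFinset_card_le keys
  omega

-- A's while loop returns the first free candidate, given enough fuel
theorem pv_aloop_eq (keys : List String) (c : Nat)
    (hc : pvCand c ∉ keys) (hmin : ∀ j, j < c → pvCand j ∈ keys) :
    ∀ (fuel k : Nat), k ≤ c → c < k + fuel → pvALoop keys fuel (k : Int) = pvCand c := by
  intro fuel
  induction fuel with
  | zero => intro k h1 h2; omega
  | succ f ih =>
    intro k h1 h2
    have hunf : pvALoop keys (f + 1) (k : Int)
        = if keys.contains ("section-" ++ PySem.Int.toStr (k : Int)) = true
          then pvALoop keys f ((k : Int) + 1)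
          else "section-" ++ PySem.Int.toStr (k : Int) := rfl
    by_cases hk : k = c
    · subst hk
      have hcont : keys.contains ("section-" ++ PySem.Int.toStr (k : Int)) = false := by
        rw [List.contains_eq_mem]; simpa [pvCand] using hc
      rw [hunf, hcont]
      simp [pvCand]
    · have hmem : keys.contains ("section-" ++ PySem.Int.toStr (k : Int)) = true := by
        rw [List.contains_eq_mem]; simpa [pvCand] using hmin k (by omega)
      rw [hunf, hmem, if_pos rfl,
          show ((k : Int) + 1) = ((k + 1 : Nat) : Int) by push_cast; ring]
      exact ih (k + 1) (by omega) (by omega)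

-- the final present array of B, as an explicit table
theorem pv_present_eq (anchors : List (String × List (String × Int))) :
    pvMark (pvIndexOf anchors.length) (List.replicate (anchors.length + 1) false) anchors
      = (List.range (anchors.length + 1)).map
          (fun j => decide (pvCand j ∈ anchors.map Prod.fst)) := by
  apply List.ext_getElem
  · rw [pv_mark_length]; simp
  · intro i h1 h2
    have hi : i < anchors.length + 1 := by
      rw [pv_mark_length, List.length_replicate] at h1; exact h1
    have hgd := pv_mark_getD anchors.length anchors
      (List.replicate (anchors.length + 1) false) (by simp) i hi
    have hLHS : (pvMark (pvIndexOf anchors.length)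
          (List.replicate (anchors.length + 1) false) anchors)[i]
        = (pvMark (pvIndexOf anchors.length)
          (List.replicate (anchors.length + 1) false) anchors).getD i false := by
      rw [List.getD_eq_getElem?_getD, List.getElem?_eq_getElem h1]
      rfl
    rw [hLHS, hgd]
    simp [List.getD_eq_getElem?_getD, hi]

-- first occurrence of `false` in a tabulated boolean list
theorem pv_index?_map_range (f : Nat → Bool) (N c : Nat) (hcN : c < N) (hfc : f c = false)
    (hlt : ∀ j, j < c → f j = true) :
    PySem.List.index? ((List.range N).map f) false = some c := by
  rw [PySem.List.index?_eq_some_iff]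
  refine ⟨(List.range' 0 c).map f, (List.range' (c + 1) (N - c - 1)).map f, ?_, by simp, ?_⟩
  · have happ := List.range'_append (s := 0) (m := c) (n := N - c) (step := 1)
    simp only [Nat.one_mul, Nat.zero_add] at happ
    rw [show N - c = (N - c - 1) + 1 from by omega, List.range'_succ] at happ
    have hsplit : List.range N = List.range' 0 c ++ c :: List.range' (c + 1) (N - c - 1) := by
      rw [List.range_eq_range',
          show List.range' 0 N = List.range' 0 (c + (N - c - 1 + 1)) from by congr 1; omega,
          ← happ]
    rw [hsplit]
    simp [hfc]
  · intro hmem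
    obtain ⟨j, hj, hfj⟩ := List.mem_map.mp hmem
    have hjc : j < c := by
      have := List.mem_range'_1.mp hj
      omega
    rw [hlt j hjc] at hfj
    simp at hfj

-- ===== VERDICT (by name: the statement is the Claim_ definition above) =====
theorem generate_entity_anchor_py_spec : Claim_equal_generate_entity_anchor_py := by
  intro entity anchors _
  unfold Spec_generate_entity_anchor_py
  have hex : ∃ j : Nat, pvCand j ∉ anchors.map Prod.fst := by
    by_contra hall
    push_neg at hall
    have h := pv_used_le (anchors.map Prod.fst) ((anchors.map Prod.fst).length + 1)
      (fun j _ => hall j)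
    omega
  have hc : pvCand (Nat.find hex) ∉ anchors.map Prod.fst := Nat.find_spec hex
  have hmin : ∀ j, j < Nat.find hex → pvCand j ∈ anchors.map Prod.fst :=
    fun j hj => not_not.mp (Nat.find_min hex hj)
  have hcle : Nat.find hex ≤ anchors.length := by
    have h := pv_used_le (anchors.map Prod.fst) (Nat.find hex) hmin
    simpa using h
  have hA : generate_entity_anchor_py entity anchors = pvCand (Nat.find hex) := by
    have h := pv_aloop_eq (anchors.map Prod.fst) (Nat.find hex) hc hmin
      (anchors.length + 1) 0 (by omega) (by omega)
    simpa [generate_entity_anchor_py] using h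
  have hB : generate_entity_anchor_py_alt entity anchors = pvCand (Nat.find hex) := by
    have hidx : PySem.List.index?
        (pvMark (pvIndexOf anchors.length) (List.replicate (anchors.length + 1) false) anchors)
        false = some (Nat.find hex) := by
      rw [pv_present_eq]
      exact pv_index?_map_range _ _ (Nat.find hex) (by omega) (by simp [hc])
        (fun j hj => by simp [hmin j hj])
    show (match PySem.List.index?
        (pvMark (pvIndexOf anchors.length) (List.replicate (anchors.length + 1) false) anchors)
        false with
      | some i => "section-" ++ PySem.Int.toStr (i : Int)
      | none => "") = pvCand (Nat.find hex)
    rw [hidx]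
    rfl
  rw [hA, hB]
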